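-- pv_equiv track=rewrite | github.com/ChanhunSong/algorithm_python_practice | Online_Study/백준2220.py | searchMaxSwap
-- ===== SOURCE A (Python) =====
-- def searchMaxSwap(num):
--
--     if 1 == num:
--         return [0,1]
--     elif 2 == num:
--         return [0, 2, 1]
--     elif 3 == num:
--         return [0, 3, 2, 1]
--
--     res_list = searchMaxSwap(num-1)
--
--     tail_index = len(res_list)-1
--     if tail_index > 1:
--         while tail_index != 1:
--             res_list[tail_index] , res_list[tail_index//2] = res_list[tail_index//2] , res_list[tail_index]
--             tail_index = tail_index//2
--     res_list.append(num)
--     res_list[-1] , res_list[1] = res_list[1] , res_list[-1]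
--     return res_list
-- ===== SOURCE B (Python) =====
-- def searchMaxSwap(num):
--     if 1 == num:
--         return [0, 1]
--     elif 2 == num:
--         return [0, 2, 1]
--     elif 3 == num:
--         return [0, 3, 2, 1]
--
--     res_list = [0, 3, 2, 1]
--     for n in range(4, num + 1):
--         tail_index = len(res_list) - 1
--         while tail_index != 1:
--             res_list[tail_index], res_list[tail_index // 2] = res_list[tail_index // 2], res_list[tail_index]
--             tail_index = tail_index // 2
--         res_list.append(n)
--         res_list[-1], res_list[1] = res_list[1], res_list[-1]
--     return res_list
-- ===== Notes on version B (the rewrite author's own statement) =====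
-- stated objective: alternative
-- what changed: Replaced the recursion searchMaxSwap(num-1) with a single bottom-up loop that grows one list from the largest base case, applying the same sift-and-swap step once per value up to num.
-- outside the precondition, e.g. on searchMaxSwap(0): A raises RecursionError, B returns [0, 3, 2, 1]; on searchMaxSwap(-5): A raises RecursionError, B returns [0, 3, 2, 1]
import Mathlib
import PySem

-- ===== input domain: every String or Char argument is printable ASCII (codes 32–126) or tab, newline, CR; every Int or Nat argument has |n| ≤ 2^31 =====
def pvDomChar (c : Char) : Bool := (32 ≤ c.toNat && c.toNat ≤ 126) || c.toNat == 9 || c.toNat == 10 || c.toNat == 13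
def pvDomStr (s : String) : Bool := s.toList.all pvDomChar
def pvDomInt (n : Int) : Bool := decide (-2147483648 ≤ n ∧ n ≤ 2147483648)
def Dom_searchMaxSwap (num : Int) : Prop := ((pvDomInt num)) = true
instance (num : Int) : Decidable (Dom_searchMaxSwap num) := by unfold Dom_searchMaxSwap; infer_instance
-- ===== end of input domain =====

-- B replaces A's recursion on num-1 by one bottom-up loop growing a single list from the
-- largest base case (alternative decomposition; equivalence is about the return value).

-- ===== PORT A =====
-- Python's simultaneous 'l[i], l[j] = l[j], l[i]' (indices always in range and distinct here):
-- first l[i] gets old l[j], then l[j] gets old l[i].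
def pvSwapA (l : List Int) (i j : Nat) : List Int :=
  (l.set i (l.getD j 0)).set j (l.getD i 0)

-- 'if tail_index > 1: while tail_index != 1: swap; halve' — the guard and the loop exit
-- coincide in 'if t ≤ 1 then stop' (the loop is only entered with t > 1 and halving keeps t ≥ 1).
def pvSiftA (l : List Int) (t : Nat) : List Int :=
  if t ≤ 1 then l else pvSiftA (pvSwapA l t (t / 2)) (t / 2)
termination_by t
decreasing_by exact Nat.div_lt_self (by omega) (by norm_num)

-- A's recursion, on num.toNat; for num ≤ 0 the Python recurses past its base cases and raises
-- RecursionError — those inputs are excluded by Pre_ (the 0 clause is unreachable there).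
def pvGoA : Nat → List Int
  | 0 => []
  | 1 => [0, 1]
  | 2 => [0, 2, 1]
  | 3 => [0, 3, 2, 1]
  | n + 4 =>
    let res := pvGoA (n + 3)
    let res := pvSiftA res (res.length - 1)
    let res := res ++ [((n : Int) + 4)]
    pvSwapA res (res.length - 1) 1

def searchMaxSwap (num : Int) : List Int := pvGoA num.toNat

-- ===== PORT B =====
def pvSwapB (l : List Int) (i j : Nat) : List Int :=
  (l.set i (l.getD j 0)).set j (l.getD i 0)

def pvSiftB (l : List Int) (t : Nat) : List Int :=
  if t ≤ 1 then l else pvSiftB (pvSwapB l t (t / 2)) (t / 2)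
termination_by t
decreasing_by exact Nat.div_lt_self (by omega) (by norm_num)

-- one iteration of B's for-loop body
def pvStepB (l : List Int) (n : Int) : List Int :=
  let l1 := pvSiftB l (l.length - 1)
  let l2 := l1 ++ [n]
  pvSwapB l2 (l2.length - 1) 1

def searchMaxSwap_alt (num : Int) : List Int :=
  if num = 1 then [0, 1]
  else if num = 2 then [0, 2, 1]
  else if num = 3 then [0, 3, 2, 1]
  else (PySem.List.pyRange 4 (num + 1) 1).foldl pvStepB [0, 3, 2, 1]

-- ===== PRECONDITION & SPEC =====
-- Pre_ excludes exactly num ≤ 0, where the Python A recurses forever past its base cases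
-- (RecursionError); A returns normally on every num ≥ 1.
def Pre_searchMaxSwap (num : Int) : Prop := 1 ≤ num
instance (num : Int) : Decidable (Pre_searchMaxSwap num) := by unfold Pre_searchMaxSwap; infer_instance
def pvWitness_searchMaxSwap : Int := (5)

def Spec_searchMaxSwap (num : Int) (out : List Int) : Prop := out = searchMaxSwap_alt num
instance (num : Int) (out : List Int) : Decidable (Spec_searchMaxSwap num out) := by unfold Spec_searchMaxSwap; infer_instance

-- ===== CLAIM (what is proved, stated in full; the proofs are below) =====
def Claim_equal_searchMaxSwap : Prop := ∀ (num : Int), Dom_searchMaxSwap num → Pre_searchMaxSwap num → Spec_searchMaxSwap num (searchMaxSwap num)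

-- ===== LEMMAS AND PROOFS =====

lemma swapAB : pvSwapB = pvSwapA := rfl

lemma siftAB : ∀ t l, pvSiftB l t = pvSiftA l t := by
  intro t
  induction t using Nat.strong_induction_on with
  | _ t ih =>
    intro l
    rw [pvSiftB, pvSiftA, swapAB]
    split
    · rfl
    · exact ih (t / 2) (Nat.div_lt_self (by omega) (by norm_num)) _

lemma stepAB (l : List Int) (n : Int) :
    pvStepB l n = pvSwapA (pvSiftA l (l.length - 1) ++ [n]) ((pvSiftA l (l.length - 1) ++ [n]).length - 1) 1 := by
  simp [pvStepB, siftAB, swapAB]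

lemma goA_foldl : ∀ k : Nat,
    pvGoA (k + 4) = (PySem.List.pyRange 4 ((k : Int) + 4 + 1) 1).foldl pvStepB [0, 3, 2, 1] := by
  intro k
  induction k with
  | zero =>
    have hr : PySem.List.pyRange 4 ((0 : Nat) + 4 + 1 : Int) 1 = [4] := by decide
    push_cast
    push_cast at hr
    rw [hr]
    simp only [List.foldl, pvGoA, stepAB]
    norm_num
  | succ k ih =>
    have hr : PySem.List.pyRange 4 (((k : Int) + 4 + 1) + 1) 1
        = PySem.List.pyRange 4 ((k : Int) + 4 + 1) 1 ++ [(k : Int) + 4 + 1] :=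
      PySem.List.pyRange_one_succ_right (by omega)
    push_cast
    rw [show ((k : Int) + 1 + 4 + 1) = (((k : Int) + 4 + 1) + 1) by ring, hr, List.foldl_append]
    simp only [List.foldl]
    rw [← ih]
    show pvGoA (k + 1 + 4) = _
    rw [show k + 1 + 4 = (k + 4) + 1 from rfl]
    simp only [pvGoA, stepAB]
    push_cast
    ring_nf

-- ===== VERDICT (by name: the statement is the Claim_ definition above) =====
theorem searchMaxSwap_spec : Claim_equal_searchMaxSwap := by
  intro num _ hpre
  unfold Spec_searchMaxSwap searchMaxSwap searchMaxSwap_alt Pre_searchMaxSwap at *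
  obtain ⟨m, rfl⟩ : ∃ m : Nat, num = (m : Int) :=
    ⟨num.toNat, (Int.toNat_of_nonneg (by omega)).symm⟩
  rcases m with _ | _ | _ | _ | k
  · omega
  · norm_num; decide
  · norm_num; decide
  · norm_num; decide
  · rw [if_neg (by omega), if_neg (by omega), if_neg (by omega), Int.toNat_natCast,
      goA_foldl k]
    push_cast
    ring_nf
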